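-- pv_equiv track=rewrite | github.com/agrawallab/DANCE | analysis_scripts/Overlap_analyzer/Overlap_analyzer.py | finding_overlaptuples
-- ===== SOURCE A (Python) =====
-- def finding_overlaptuples(test_list, test_tuples):
--     result = []
--     for test_tup in test_tuples:
--         res = []
--         for tup in test_list:
--             if (tup[1] >= test_tup[0] and tup[0] <= test_tup[1]):
--                 res.append(tup)
--         result.append(res)
--     return result
-- ===== SOURCE B (Python) =====
-- def finding_overlaptuples(test_list, test_tuples):
--     # Start-sorted sweep: sort intervals by start once; each query scans only
--     # until a start exceeds its upper bound, then restores original order.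
--     s = sorted(((a, b, i) for i, (a, b) in enumerate(test_list)), key=lambda t: t[0])
--     result = []
--     for lo, hi in test_tuples:
--         hits = []
--         for a, b, i in s:
--             if a > hi:
--                 break
--             if b >= lo:
--                 hits.append((a, b, i))
--         hits.sort(key=lambda t: t[2])
--         result.append([(a, b) for a, b, i in hits])
--     return result
-- ===== Notes on version B (the rewrite author's own statement) =====
-- stated objective: alternative
-- what changed: B pre-sorts the intervals by start point once, answers each query by a scan that stops at the first start exceeding the query's upper bound, and restores the original order by sorting hits on their original index, instead of A's full rescan of test_list for every query.
import Mathlib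
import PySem

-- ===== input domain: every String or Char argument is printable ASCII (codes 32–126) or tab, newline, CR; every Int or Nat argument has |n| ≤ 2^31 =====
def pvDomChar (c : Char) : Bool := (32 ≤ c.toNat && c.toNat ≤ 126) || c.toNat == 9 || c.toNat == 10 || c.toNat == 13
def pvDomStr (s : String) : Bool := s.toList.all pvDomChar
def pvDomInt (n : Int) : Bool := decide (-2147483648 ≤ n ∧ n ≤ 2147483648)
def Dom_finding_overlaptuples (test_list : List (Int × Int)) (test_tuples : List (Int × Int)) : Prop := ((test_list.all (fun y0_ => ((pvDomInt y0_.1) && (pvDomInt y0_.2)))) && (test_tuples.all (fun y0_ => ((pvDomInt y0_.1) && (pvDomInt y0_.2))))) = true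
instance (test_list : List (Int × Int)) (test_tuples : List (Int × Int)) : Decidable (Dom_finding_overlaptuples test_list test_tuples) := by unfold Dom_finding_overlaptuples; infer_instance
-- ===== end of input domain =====

-- B pre-sorts the intervals by start and stops each query's scan at the first start above the
-- query's upper bound, restoring original order via the original indices (objective: alternative).

-- ===== PORT A =====
def finding_overlaptuples (test_list : List (Int × Int)) (test_tuples : List (Int × Int)) : List (List (Int × Int)) :=
  test_tuples.foldl (fun result test_tup =>
    result ++ [test_list.foldl (fun res tup =>
      if tup.2 ≥ test_tup.1 ∧ tup.1 ≤ test_tup.2 then res ++ [tup] else res) []]) []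

-- ===== PORT B =====
-- inner scan over the start-sorted list: break as soon as a start exceeds hi
def pvSweep (lo hi : Int) : List (Int × Int × Int) → List (Int × Int × Int)
  | [] => []
  | t :: rest =>
    if t.1 > hi then []
    else if t.2.1 ≥ lo then t :: pvSweep lo hi rest
    else pvSweep lo hi rest

def finding_overlaptuples_alt (test_list : List (Int × Int)) (test_tuples : List (Int × Int)) : List (List (Int × Int)) :=
  let indexed := (PySem.List.enumerate test_list 0).map (fun p => (p.2.1, p.2.2, p.1))
  let s := PySem.List.sorted indexed (fun t => t.1) false
  test_tuples.map (fun q =>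
    (PySem.List.sorted (pvSweep q.1 q.2 s) (fun t => t.2.2) false).map (fun t => (t.1, t.2.1)))

-- ===== PRECONDITION & SPEC =====
def Spec_finding_overlaptuples (test_list : List (Int × Int)) (test_tuples : List (Int × Int)) (out : List (List (Int × Int))) : Prop := out = finding_overlaptuples_alt test_list test_tuples
instance (test_list : List (Int × Int)) (test_tuples : List (Int × Int)) (out : List (List (Int × Int))) : Decidable (Spec_finding_overlaptuples test_list test_tuples out) := by unfold Spec_finding_overlaptuples; infer_instance

-- ===== CLAIM (what is proved, stated in full; the proofs are below) =====
def Claim_equal_finding_overlaptuples : Prop := ∀ (test_list : List (Int × Int)) (test_tuples : List (Int × Int)), Dom_finding_overlaptuples test_list test_tuples → Spec_finding_overlaptuples test_list test_tuples (finding_overlaptuples test_list test_tuples)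

-- ===== LEMMAS AND PROOFS =====

-- On a list whose starts are nondecreasing, the break-scan collects exactly the overlap filter.
lemma pvSweep_eq_filter (lo hi : Int) (s : List (Int × Int × Int))
    (h : s.Pairwise (fun a b => a.1 ≤ b.1)) :
    pvSweep lo hi s = s.filter (fun t => decide (t.1 ≤ hi ∧ t.2.1 ≥ lo)) := by
  induction s with
  | nil => rfl
  | cons t rest ih =>
    rcases List.pairwise_cons.mp h with ⟨hhd, htl⟩
    by_cases hbig : t.1 > hi
    · have : rest.filter (fun t => decide (t.1 ≤ hi ∧ t.2.1 ≥ lo)) = [] := by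
        rw [List.filter_eq_nil_iff]
        intro x hx
        simp only [decide_eq_true_eq, not_and]
        intro hle
        exact absurd (le_trans (hhd x hx) hle) (not_le.mpr hbig)
      simp only [pvSweep, if_pos hbig, List.filter_cons]
      rw [this]
      simp [not_le.mpr hbig]
    · by_cases hb : t.2.1 ≥ lo
      · simp [pvSweep, hbig, hb, not_lt.mp hbig, ih htl]
      · simp [pvSweep, hbig, hb, ih htl]

-- Re-sorting the surviving triples by original index recovers the filter of the
-- index-ordered list.
lemma pvSortBack (indexed s : List (Int × Int × Int)) (P : Int × Int × Int → Bool)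
    (hperm : s.Perm indexed) (hidx : indexed.Pairwise (fun a b => a.2.2 < b.2.2)) :
    PySem.List.sorted (s.filter P) (fun t => t.2.2) false = indexed.filter P := by
  apply PySem.List.sorted_eq_of_perm_of_pairwise_lt
  · exact (hperm.filter P).symm
  · exact hidx.filter P

-- The projected filter of the enumerated list is the filter of the original list.
lemma pvProj_filter (tl : List (Int × Int)) (lo hi : Int) : ∀ (s0 : Int),
    (((PySem.List.enumerate tl s0).map (fun p => (p.2.1, p.2.2, p.1))).filter
        (fun t => decide (t.1 ≤ hi ∧ t.2.1 ≥ lo))).map (fun t => (t.1, t.2.1))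
      = tl.filter (fun t => decide (t.2 ≥ lo ∧ t.1 ≤ hi)) := by
  induction tl with
  | nil => intro s0; rfl
  | cons x xs ih =>
    intro s0
    have ih' := ih (s0 + 1)
    simp only [PySem.List.enumerate_cons, List.map_cons, List.filter_cons, Bool.decide_and,
      ge_iff_le] at ih' ⊢
    by_cases h1 : x.1 ≤ hi <;> by_cases h2 : lo ≤ x.2 <;> simp [h1, h2, ih']

-- ===== VERDICT (by name: the statement is the Claim_ definition above) =====
theorem finding_overlaptuples_spec : Claim_equal_finding_overlaptuples := by
  intro test_list test_tuples _
  unfold Spec_finding_overlaptuples finding_overlaptuples finding_overlaptuples_alt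
  rw [PySem.List.foldl_append_singleton_eq_map, List.nil_append]
  apply List.map_congr_left
  intro q _
  rw [PySem.List.foldl_append_ite_eq_filter]
  set indexed := (PySem.List.enumerate test_list 0).map (fun p => (p.2.1, p.2.2, p.1)) with hindexed
  set s := PySem.List.sorted indexed (fun t => t.1) false with hs
  have hpair : s.Pairwise (fun a b => a.1 ≤ b.1) := PySem.List.sorted_pairwise ..
  rw [pvSweep_eq_filter q.1 q.2 s hpair]
  have hidx : indexed.Pairwise (fun a b => a.2.2 < b.2.2) := by
    rw [hindexed]
    exact (PySem.List.pairwise_lt_enumerate test_list 0).map _ (fun a b h => h)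
  rw [pvSortBack indexed s _ (PySem.List.sorted_perm ..) hidx]
  rw [hindexed, pvProj_filter test_list q.1 q.2 0]
  simp
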